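-- pv_equiv track=rewrite | github.com/Cubos-y-Compiladores/CUBO---Compilador | Tools/Tools.py | nope
-- ===== SOURCE A (Python) =====
-- def matVerifier(var):
--     if (isinstance(var,list)):
--         if (len(var)!=0 and isinstance(var[0],list)):
--             return True
--     return False
--
-- def matrixVerifier(var):
--     if(isinstance(var,list)):
--         if(len(var)!=0 and isinstance(var[0],list)):
--             if (len(var[0])!=0 and isinstance(var[0][0],list)):
--                 return False
--             return True
--     return False
--
-- def nope(structure):
--     if(isinstance(structure,list)):
--         if(matVerifier(structure)):
--             lin = 0
--             if(matrixVerifier(structure)):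
--                 for line in structure:
--                     col=0
--                     for value in line:
--                         structure[lin][col]=not value
--                         col+=1
--                     lin+=1
--             else:
--                 mat=0
--                 for matrix in structure:
--                     lin=0
--                     for line in matrix:
--                         col=0
--                         for value in line:
--                             structure[mat][lin][col]=not value
--                             col+=1
--                         lin+=1
--                     mat+=1
--         else:
--             ind=0
--             for valor in structure:
--                 structure[ind]=not valor
--                 ind+=1
--     else:
--         structure=not structure
--     return structure
-- ===== SOURCE B (Python) =====
-- def _negate(lst, depth):
--     for i, val in enumerate(lst):
--         if depth == 1:
--             lst[i] = not val
--         else: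
--             _negate(val, depth - 1)
--
-- def nope(structure):
--     if not isinstance(structure, list):
--         return not structure
--     depth = 1
--     probe = structure
--     while depth < 3 and len(probe) != 0 and isinstance(probe[0], list):
--         depth += 1
--         probe = probe[0]
--     _negate(structure, depth)
--     return structure
-- ===== Notes on version B (the rewrite author's own statement) =====
-- stated objective: simpler
-- what changed: A's three hand-unrolled branches (flat/2D/3D loops with manual mat/lin/col counters and in-place index assignment) are replaced by a single first-element depth probe plus one uniform recursive negate helper.
-- outside the precondition, e.g. on nope([[], [[True]]]): A returns [[], [False]], B returns [[], [False]]
import Mathlib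
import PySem

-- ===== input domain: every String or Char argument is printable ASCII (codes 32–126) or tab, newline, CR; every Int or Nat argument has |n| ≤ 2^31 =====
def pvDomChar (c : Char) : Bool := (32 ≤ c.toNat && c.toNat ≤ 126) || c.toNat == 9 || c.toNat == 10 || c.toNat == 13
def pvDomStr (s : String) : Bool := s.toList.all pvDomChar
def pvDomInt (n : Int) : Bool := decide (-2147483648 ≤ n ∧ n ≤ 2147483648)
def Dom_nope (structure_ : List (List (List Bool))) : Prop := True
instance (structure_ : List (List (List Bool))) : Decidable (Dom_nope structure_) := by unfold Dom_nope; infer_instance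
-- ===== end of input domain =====

-- B replaces A's three hand-unrolled index-counter loop branches by one first-element depth probe plus
-- uniform structural recursion (objective: simpler). Both Pythons mutate the argument in place in the
-- same way; the equivalence proved here is about the return value.

-- ===== PORT A =====
-- matVerifier(var): var is a list (by the type), var[0] is a list (by the type) ⇒ true iff len(var)!=0
def matVerifier (var : List (List (List Bool))) : Bool := var.length != 0

-- matrixVerifier(var): true iff var ≠ [] and NOT (len(var[0])!=0 and var[0][0] is a list (always true))
def matrixVerifier (var : List (List (List Bool))) : Bool := var.length != 0 && var.headI.length == 0

-- innermost Python loop: for value in line: structure[mat][lin][col] = not value; col += 1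
-- (state = (structure, col); the in-place item assignment is List.modify/List.set)
def nopeLoopCol (mat lin : Nat) (line : List Bool) (s : List (List (List Bool))) (col : Nat) :
    List (List (List Bool)) × Nat :=
  line.foldl
    (fun (r : List (List (List Bool)) × Nat) value =>
      (r.1.modify mat (fun m => m.modify lin (fun l => l.set r.2 (!value))), r.2 + 1))
    (s, col)

-- middle loop: for line in matrix: col = 0; …; lin += 1   (state = (structure, lin))
def nopeLoopLin (mat : Nat) (matrix : List (List Bool)) (s : List (List (List Bool))) (lin : Nat) :
    List (List (List Bool)) × Nat :=
  matrix.foldl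
    (fun (q : List (List (List Bool)) × Nat) line => ((nopeLoopCol mat q.2 line q.1 0).1, q.2 + 1))
    (s, lin)

def nope (structure_ : List (List (List Bool))) : List (List (List Bool)) :=
  -- isinstance(structure, list) is true by the type
  if matVerifier structure_ then
    if matrixVerifier structure_ then
      -- 2-D branch: Python writes structure[lin][col] = not value where value is a LIST — the result
      -- leaves the declared type unless every sublist is empty (Pre_ admits only that case), and on
      -- all-empty sublists the two loops never execute a body: the structure comes back unchanged.
      structure_
    else
      -- 3-D branch: mat = 0; for matrix in structure: lin = 0; …; mat += 1
      (structure_.foldl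
        (fun (p : List (List (List Bool)) × Nat) matrix => ((nopeLoopLin p.2 matrix p.1 0).1, p.2 + 1))
        (structure_, 0)).1
  else
    -- flat branch: on this type matVerifier fails only for structure == [], where the Python loop
    -- `for valor in structure: structure[ind] = not valor` runs zero times.
    structure_

-- ===== PORT B =====
-- _negate(lst, 1) on a line of Bools: lst[i] = not val, elementwise
def negLine : List Bool → List Bool
  | [] => []
  | b :: t => (!b) :: negLine t

-- _negate(lst, 2) reached from depth 3: recurse into each line
def negMat : List (List Bool) → List (List Bool)
  | [] => []
  | l :: t => negLine l :: negMat t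

-- _negate(lst, 3): recurse into each matrix
def negCube : List (List (List Bool)) → List (List (List Bool))
  | [] => []
  | m :: t => negMat m :: negCube t

def nope_alt (structure_ : List (List (List Bool))) : List (List (List Bool)) :=
  -- structure is a list by the type; first-element probe: depth 1 → 2 iff structure ≠ [] (its head is
  -- a list by the type); depth 2 → 3 iff structure[0] ≠ [] (its head is again a list by the type)
  let depth : Nat := if structure_.isEmpty then 1 else if structure_.headI.isEmpty then 2 else 3
  if depth = 3 then negCube structure_
  else
    -- depth 1: structure == [], _negate loops zero times; depth 2: _negate writes `not val` where val
    -- is a LIST — type-leaving except when every sublist is empty (the only depth-2 case Pre_ admits),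
    -- where the recursion touches nothing: the structure comes back unchanged.
    structure_

-- ===== PRECONDITION & SPEC =====
-- Pre_ excludes inputs whose first sublist is empty while some sublist is nonempty: there A (and B
-- alike) assign `not <list>` and return bare Bools where lists of lists are declared — not a value of
-- the declared type.
def Pre_nope (structure_ : List (List (List Bool))) : Prop :=
  structure_.headI = [] → structure_.all (· = []) = true
instance (structure_ : List (List (List Bool))) : Decidable (Pre_nope structure_) := by
  unfold Pre_nope; infer_instance

def pvWitness_nope : List (List (List Bool)) := [[[true, false]], [[false], []]]

def Spec_nope (structure_ : List (List (List Bool))) (out : List (List (List Bool))) : Prop := out = nope_alt structure_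
instance (structure_ : List (List (List Bool))) (out : List (List (List Bool))) : Decidable (Spec_nope structure_ out) := by unfold Spec_nope; infer_instance

-- ===== CLAIM (what is proved, stated in full; the proofs are below) =====
def Claim_equal_nope : Prop := ∀ (structure_ : List (List (List Bool))), Dom_nope structure_ → Pre_nope structure_ → Spec_nope structure_ (nope structure_)

-- ===== LEMMAS AND PROOFS =====

-- modifying twice at the same index composes
theorem modify_modify_same {α : Type} (l : List α) (i : Nat) (f g : α → α) :
    (l.modify i f).modify i g = l.modify i (fun x => g (f x)) := by
  induction l generalizing i with
  | nil => simp
  | cons a t ih =>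
    cases i with
    | zero => simp
    | succ j => simp [ih]

-- modify at a split point rewrites exactly that element
theorem modify_append_length {α : Type} (l1 l2 : List α) (a : α) (f : α → α) :
    (l1 ++ a :: l2).modify l1.length f = l1 ++ f a :: l2 := by
  induction l1 with
  | nil => simp
  | cons x t ih => simp [ih]

-- set at a split point replaces exactly that element
theorem set_append_length {α : Type} (l1 l2 : List α) (a b : α) :
    (l1 ++ a :: l2).set l1.length b = l1 ++ b :: l2 := by
  induction l1 with
  | nil => simp
  | cons x t ih => simp [ih]

-- getD at a split point reads exactly that element
theorem getD_append_length {α : Type} (l1 l2 : List α) (a d : α) :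
    (l1 ++ a :: l2).getD l1.length d = a := by
  induction l1 with
  | nil => simp
  | cons x t ih => simp [ih]

-- replacing an element by its current value is the identity
theorem modify_getD_self {α : Type} (d : α) (s : List α) (i : Nat) :
    s.modify i (fun _ => s.getD i d) = s := by
  induction s generalizing i with
  | nil => simp
  | cons a t ih =>
    cases i with
    | zero => simp
    | succ j => simpa using ih j

-- getD through a modify at the same (in-range) index
theorem getD_modify_self {α : Type} (s : List α) (i : Nat) (f : α → α) (d : α)
    (h : i < s.length) : (s.modify i f).getD i d = f (s.getD i d) := by
  induction s generalizing i with
  | nil => simp at h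
  | cons a t ih =>
    cases i with
    | zero => simp
    | succ j => simpa using ih j (by simpa using h)

-- the column loop re-expressed as one modify of the (mat, lin) slot, with the plain
-- set-by-counter fold acting on that slot alone
def setFold (line l : List Bool) (c : Nat) : List Bool × Nat :=
  line.foldl (fun (r : List Bool × Nat) value => (r.1.set r.2 (!value), r.2 + 1)) (l, c)

theorem nopeLoopCol_modify (mat lin : Nat) (line : List Bool) :
    ∀ (s : List (List (List Bool))) (c : Nat),
      (nopeLoopCol mat lin line s c).1 =
        s.modify mat (fun m => m.modify lin (fun l => (setFold line l c).1)) := by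
  induction line with
  | nil =>
    intro s c
    show s = s.modify mat fun m => m.modify lin fun l => l
    have h1 : ∀ m : List (List Bool), m.modify lin (fun l => l) = m :=
      fun m => List.modify_id lin m
    simp only [h1]
    exact (List.modify_id mat s).symm
  | cons v t ih =>
    intro s c
    show (nopeLoopCol mat lin t
        (s.modify mat (fun m => m.modify lin (fun l => l.set c (!v)))) (c + 1)).1 = _
    rw [ih, modify_modify_same]
    refine congrArg _ (funext fun m => ?_)
    rw [modify_modify_same]
    rfl

-- the set-by-counter fold, started on the very list it reads, negates the suffix in place
theorem setFold_self (line : List Bool) :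
    ∀ (pre : List Bool), (setFold line (pre ++ line) pre.length).1 = pre ++ negLine line := by
  induction line with
  | nil => intro pre; simp [setFold, negLine]
  | cons b t ih =>
    intro pre
    show (setFold t ((pre ++ b :: t).set pre.length (!b)) (pre.length + 1)).1 = _
    rw [set_append_length]
    have h1 : pre ++ (!b) :: t = (pre ++ [(!b)]) ++ t := by simp
    have h2 : pre.length + 1 = (pre ++ [(!b)]).length := by simp
    rw [h1, h2, ih (pre ++ [(!b)])]
    simp [negLine]

-- the line loop negates, line by line, the matrix sitting at index mat of the structure
theorem nopeLoopLin_modify (mat : Nat) :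
    ∀ (rest done : List (List Bool)) (s : List (List (List Bool))),
      s.getD mat [] = done ++ rest →
      (nopeLoopLin mat rest s done.length).1 = s.modify mat (fun _ => done ++ negMat rest) := by
  intro rest
  induction rest with
  | nil =>
    intro done s h
    show s = s.modify mat fun _ => done ++ negMat []
    have h' : s.getD mat [] = done ++ negMat [] := by simpa [negMat] using h
    simp only [← h']
    exact (modify_getD_self [] s mat).symm
  | cons l t ih =>
    intro done s h
    have hlt : mat < s.length := by
      by_contra hge
      rw [List.getD_eq_getElem?_getD, List.getElem?_eq_none (by omega)] at h
      simp at h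
    show (nopeLoopLin mat t ((nopeLoopCol mat done.length l s 0).1) (done.length + 1)).1 = _
    rw [nopeLoopCol_modify]
    have hset : (s.modify mat fun m => m.modify done.length fun x => (setFold l x 0).1).getD mat []
        = (done ++ [negLine l]) ++ t := by
      rw [getD_modify_self _ _ _ _ hlt, h, modify_append_length]
      have := setFold_self l []
      simp only [List.nil_append, List.length_nil] at this
      simp [this]
    have h2 : done.length + 1 = (done ++ [negLine l]).length := by simp
    rw [h2, ih (done ++ [negLine l]) _ hset, modify_modify_same]
    simp [negMat]

-- the outer matrix loop, started on the structure itself, negates everything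
theorem nopeOuter (rest : List (List (List Bool))) :
    ∀ (done s : List (List (List Bool))), s = done ++ rest →
      ((rest.foldl
        (fun (p : List (List (List Bool)) × Nat) matrix => ((nopeLoopLin p.2 matrix p.1 0).1, p.2 + 1))
        (s, done.length)).1) = done ++ negCube rest := by
  induction rest with
  | nil => intro done s h; simpa [negCube] using h
  | cons m t ih =>
    intro done s h
    show ((t.foldl _ ((nopeLoopLin done.length m s 0).1, done.length + 1)).1) = _
    have hget : s.getD done.length [] = [] ++ m := by
      rw [h, List.nil_append, getD_append_length]
    have := nopeLoopLin_modify done.length m [] s hget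
    simp only [List.length_nil, List.nil_append] at this
    rw [this, h, modify_append_length]
    have h2 : done.length + 1 = (done ++ [negMat m]).length := by simp
    rw [h2, ih (done ++ [negMat m]) _ (by simp)]
    simp [negCube]

-- ===== VERDICT (by name: the statement is the Claim_ definition above) =====
theorem nope_spec : Claim_equal_nope := by
  intro s _ hpre
  show nope s = nope_alt s
  match s with
  | [] => rfl
  | m :: t =>
    by_cases hm : m = []
    · -- first sublist empty: Pre_ forces every sublist empty; both sides return s unchanged
      subst hm
      have : nope ([] :: t) = [] :: t := by
        simp [nope, matVerifier, matrixVerifier]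
      rw [this]
      simp [nope_alt]
    · -- 3-D branch on both sides
      have hA : nope (m :: t) =
          (((m :: t).foldl
            (fun (p : List (List (List Bool)) × Nat) matrix =>
              ((nopeLoopLin p.2 matrix p.1 0).1, p.2 + 1))
            (m :: t, 0)).1) := by
        simp [nope, matVerifier, matrixVerifier, List.headI, hm]
      rw [hA]
      have := nopeOuter (m :: t) [] (m :: t) (by simp)
      simp only [List.length_nil, List.nil_append] at this
      rw [this]
      simp [nope_alt, List.headI, hm, List.isEmpty_iff]
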